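-- pv_equiv track=rewrite | github.com/Byongho96/algorithm_practice | Baekjoon/1062_가르침.py | solution
-- ===== SOURCE A (Python) =====
-- from typing import List
--
-- OFFSET = ord('a')
--
-- REQUIRED_ALPHABETS = ('a', 'n', 't', 'i', 'c')
--
-- def backtracking(N:int, K: int, words: List[int], k: int, learned: int, start_idx: int) -> int:
--     # end condition
--     if k == K:
--         # calculate local answer
--         answer = 0
--         for word in words:
--             if word | learned == learned:
--                 answer += 1
--         return answer
--
--     # pruning
--     if (25 - start_idx + 1) < (K - k):   # can learn < remain words
--         return 0
--
--     # traverse candidates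
--     mx = 0
--     for idx in range(start_idx, 26):
--         # already learned
--         if learned & 1 << idx:
--             continue
--
--         learned |= 1 << idx
--         mx = max(backtracking(N, K, words, k + 1, learned, idx + 1), mx)
--         learned &= ~(1 << idx)
--
--         if mx == N:
--             return mx
--
--     return mx
--
-- def solution(N: int, K: int, words: List[str]) -> int:
--     # a, n, t, i, c
--     if K < 5:
--         return 0
--
--     if K == 26:
--         return N
--
--     # bit mask the words
--     words_bit = []
--     for word in words:
--         bit = 0
--         for c in word:
--             bit |= 1 << (ord(c) - OFFSET)
--         words_bit.append(bit)
--
--     # learn the required alphabets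
--     learned = 0
--     for c in REQUIRED_ALPHABETS:
--         learned |= 1 << ord(c) - OFFSET
--
--     # backtracking
--     return (backtracking(N, K, words_bit, 5, learned, 1))
-- ===== SOURCE B (Python) =====
-- from itertools import combinations
-- from typing import List
--
--
-- def solution(N: int, K: int, words: List[str]) -> int:
--     if K < 5:
--         return 0
--     if K == 26:
--         return N
--
--     base = 0
--     for c in 'antic':
--         base |= 1 << (ord(c) - ord('a'))
--
--     bits = []
--     for word in words:
--         b = 0
--         for ch in word:
--             b |= 1 << (ord(ch) - ord('a'))
--         bits.append(b)
--
--     candidates = [i for i in range(26) if not base >> i & 1]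
--
--     best = 0
--     for combo in combinations(candidates, K - 5):
--         mask = base
--         for i in combo:
--             mask |= 1 << i
--         best = max(best, sum(1 for b in bits if b | mask == mask))
--     return best
-- ===== Notes on version B (the rewrite author's own statement) =====
-- stated objective: simpler
-- what changed: Replaces A's recursive DFS backtracking (mutating/restoring the learned bitmask, per-level pruning and an mx==N early exit) by a flat itertools.combinations enumeration of the (K-5)-subsets of the 21 candidate letter bits with a plain running maximum.
-- outside the precondition, e.g. on solution(1, 6, ['b', 'd', 'da']): A returns 1, B returns 2
import Mathlib
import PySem

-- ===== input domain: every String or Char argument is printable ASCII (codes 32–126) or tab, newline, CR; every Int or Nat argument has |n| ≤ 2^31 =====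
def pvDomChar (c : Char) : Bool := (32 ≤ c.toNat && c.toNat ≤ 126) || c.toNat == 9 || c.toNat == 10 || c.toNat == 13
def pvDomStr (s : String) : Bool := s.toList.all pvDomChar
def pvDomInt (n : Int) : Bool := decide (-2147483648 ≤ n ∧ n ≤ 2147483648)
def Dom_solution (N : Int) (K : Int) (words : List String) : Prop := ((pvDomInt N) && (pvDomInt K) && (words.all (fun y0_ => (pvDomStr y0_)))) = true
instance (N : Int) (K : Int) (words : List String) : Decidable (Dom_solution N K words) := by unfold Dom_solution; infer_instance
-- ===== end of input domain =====

-- B replaces A's recursive backtracking (DFS with bit-restore and mx==N early exit) by a flat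
-- enumeration of the (K-5)-subsets of the 21 candidate letters and a plain running maximum.
-- Word bitmasks are Nat (Python ints are unbounded; all masks here are nonnegative).

-- ===== PORT A =====
mutual
  -- literal port of Source A's `backtracking`; the `for idx in range(start_idx, 26)` loop is btLoop
  -- over the explicit range list; `fuel` is only a totality guard (recursion depth ≤ 26).
  def backtracking (fuel : Nat) (N K : Int) (words : List Nat) (k : Int) (learned : Nat) (startIdx : Nat) : Int :=
    match fuel with
    | 0 => 0
    | fuel + 1 =>
      if k == K then
        words.foldl (fun answer word => if word ||| learned == learned then answer + 1 else answer) 0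
      else if (25 - (startIdx : Int) + 1) < K - k then 0
      else btLoop fuel N K words k learned (List.range' startIdx (26 - startIdx)) 0
  termination_by (fuel, 0)

  def btLoop (fuel : Nat) (N K : Int) (words : List Nat) (k : Int) (learned : Nat) (idxs : List Nat) (mx : Int) : Int :=
    match idxs with
    | [] => mx
    | idx :: rest =>
      if learned &&& (1 <<< idx) != 0 then btLoop fuel N K words k learned rest mx
      else
        let mx' := max (backtracking fuel N K words (k + 1) (learned ||| (1 <<< idx)) (idx + 1)) mx
        if mx' == N then mx'
        else btLoop fuel N K words k learned rest mx'
  termination_by (fuel, idxs.length + 1)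
end

def solution (N : Int) (K : Int) (words : List String) : Int :=
  if K < 5 then 0
  else if K == 26 then N
  else
    let wordsBit := words.foldl
      (fun acc word => acc ++ [word.toList.foldl (fun bit c => bit ||| (1 <<< (c.toNat - 97))) 0])
      ([] : List Nat)
    let learned := ['a', 'n', 't', 'i', 'c'].foldl (fun l c => l ||| (1 <<< (c.toNat - 97))) 0
    backtracking 40 N K wordsBit 5 learned 1

-- ===== PORT B =====
-- port of itertools.combinations (combinations(l, r) in lexicographic order)
def combosN (r : Nat) (l : List Nat) : List (List Nat) :=
  match r, l with
  | 0, _ => [[]]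
  | _ + 1, [] => []
  | r + 1, x :: xs => ((combosN r xs).map (fun c => x :: c)) ++ combosN (r + 1) xs

def wordMask (w : String) : Nat :=
  w.toList.foldl (fun m c => m ||| (1 <<< (c.toNat - 97))) 0

def solution_alt (N : Int) (K : Int) (words : List String) : Int :=
  if K < 5 then 0
  else if K == 26 then N
  else
    let base := "antic".toList.foldl (fun m c => m ||| (1 <<< (c.toNat - 97))) 0
    let bits := words.map wordMask
    let cand := (List.range 26).filter (fun i => (base >>> i) &&& 1 == 0)
    (combosN (K - 5).toNat cand).foldl
      (fun best combo =>
        let mask := combo.foldl (fun m i => m ||| (1 <<< i)) base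
        max best ((bits.filter (fun b => b ||| mask == mask)).length : Int))
      0

-- ===== PRECONDITION & SPEC =====
-- Pre_ excludes (a) inputs where both programs raise ValueError (a character below 'a' is
-- bit-shifted by a negative amount), and (b) inputs with N < len(words), a corner contradicting
-- the problem statement (N is the number of words), where A's `mx == N` early exit can stop the
-- search at an order-dependent non-maximal subset; K < 5 and K == 26 return before either matters.
def Pre_solution (N : Int) (K : Int) (words : List String) : Prop :=
  K < 5 ∨ K = 26 ∨ ((∀ w ∈ words, ∀ c ∈ w.toList, 97 ≤ c.toNat) ∧ (words.length : Int) ≤ N)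
instance (N : Int) (K : Int) (words : List String) : Decidable (Pre_solution N K words) := by
  unfold Pre_solution; infer_instance

def pvWitness_solution : Int × Int × List String := (2, 7, [])

def Spec_solution (N : Int) (K : Int) (words : List String) (out : Int) : Prop := out = solution_alt N K words
instance (N : Int) (K : Int) (words : List String) (out : Int) : Decidable (Spec_solution N K words out) := by unfold Spec_solution; infer_instance

-- ===== CLAIM (what is proved, stated in full; the proofs are below) =====
def Claim_equal_solution : Prop := ∀ (N : Int) (K : Int) (words : List String), Dom_solution N K words → Pre_solution N K words → Spec_solution N K words (solution N K words)

-- ===== LEMMAS AND PROOFS =====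

-- proof-side abbreviations
def cntA (words : List Nat) (m : Nat) : Int :=
  words.foldl (fun a w => if w ||| m == m then a + 1 else a) 0

def maskOf (learned : Nat) (s : List Nat) : Nat :=
  s.foldl (fun m i => m ||| (1 <<< i)) learned

def availL (learned : Nat) (j : Nat) : List Nat :=
  (List.range' j (26 - j)).filter (fun i => !(learned.testBit i))

def Mx (f : List Nat → Int) (l : List (List Nat)) : Int :=
  l.foldl (fun b s => max b (f s)) 0

def bestOf (words : List Nat) (learned : Nat) (r : Nat) (j : Nat) : Int :=
  Mx (fun s => cntA words (maskOf learned s)) (combosN r (availL learned j))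

theorem and_shift_eq_testBit (n i : Nat) : (n &&& (1 <<< i) != 0) = n.testBit i := by
  simp [Nat.testBit, Nat.one_shiftLeft, Nat.and_two_pow]
  cases h : (n >>> i % 2 == 1) <;> simp [Nat.pos_iff_ne_zero.symm]

theorem cnt_fold_bounds (m : Nat) (l : List Nat) : ∀ (a : Int),
    a ≤ l.foldl (fun a w => if w ||| m == m then a + 1 else a) a ∧
    l.foldl (fun a w => if w ||| m == m then a + 1 else a) a ≤ a + l.length := by
  induction l with
  | nil => intro a; simp
  | cons x xs ih =>
    intro a
    simp only [List.foldl_cons, List.length_cons]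
    have h := ih (if x ||| m == m then a + 1 else a)
    constructor
    · refine le_trans ?_ h.1; split <;> omega
    · refine le_trans h.2 ?_; push_cast; split <;> omega

theorem cntA_nonneg (words : List Nat) (m : Nat) : 0 ≤ cntA words m :=
  (cnt_fold_bounds m words 0).1

theorem cntA_le_length (words : List Nat) (m : Nat) : cntA words m ≤ words.length := by
  unfold cntA
  have := (cnt_fold_bounds m words 0).2
  omega

theorem cnt_fold_filter (m : Nat) (l : List Nat) : ∀ a : Int,
    l.foldl (fun a w => if w ||| m == m then a + 1 else a) a
      = a + ((l.filter (fun b => b ||| m == m)).length : Int) := by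
  induction l with
  | nil => intro a; simp
  | cons x xs ih =>
    intro a
    simp only [List.foldl_cons, List.filter_cons]
    by_cases h : (x ||| m == m) = true
    · rw [if_pos h, if_pos h, ih]
      simp only [List.length_cons]
      push_cast; omega
    · rw [if_neg h, if_neg h, ih]

theorem cntA_eq_filter_length (l : List Nat) (m : Nat) :
    cntA l m = ((l.filter (fun b => b ||| m == m)).length : Int) := by
  unfold cntA
  rw [cnt_fold_filter]
  omega

theorem foldl_max_from (f : List Nat → Int) (hf : ∀ s, 0 ≤ f s) (l : List (List Nat)) :
    ∀ (a : Int), 0 ≤ a → l.foldl (fun b s => max b (f s)) a = max a (Mx f l) := by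
  induction l with
  | nil => intro a ha; unfold Mx; simp; omega
  | cons x xs ih =>
    intro a ha
    unfold Mx
    simp only [List.foldl_cons]
    rw [ih (max a (f x)) (le_trans ha (le_max_left _ _)),
        ih (max 0 (f x)) (le_max_left _ _)]
    have h0 : max (0 : Int) (f x) = f x := max_eq_right (hf x)
    rw [h0, max_assoc]

theorem Mx_nonneg (f : List Nat → Int) (l : List (List Nat)) : 0 ≤ Mx f l := by
  unfold Mx
  have gen : ∀ (l' : List (List Nat)) (a : Int), a ≤ l'.foldl (fun b s => max b (f s)) a := by
    intro l'
    induction l' with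
    | nil => intro a; simp
    | cons x xs ih => intro a; exact le_trans (le_max_left _ _) (ih _)
  exact gen l 0

theorem Mx_le (f : List Nat → Int) (l : List (List Nat)) (N : Int) (hN : 0 ≤ N)
    (h : ∀ s ∈ l, f s ≤ N) : Mx f l ≤ N := by
  unfold Mx
  have gen : ∀ (l' : List (List Nat)), (∀ s ∈ l', f s ≤ N) → ∀ (a : Int), a ≤ N →
      l'.foldl (fun b s => max b (f s)) a ≤ N := by
    intro l'
    induction l' with
    | nil => intro _ a ha; simpa
    | cons x xs ih =>
      intro hx a ha
      simp only [List.foldl_cons]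
      exact ih (fun s hs => hx s (List.mem_cons_of_mem _ hs))
        _ (max_le ha (hx x (List.mem_cons_self)))
  exact gen l h 0 hN

theorem Mx_append (f : List Nat → Int) (hf : ∀ s, 0 ≤ f s) (l₁ l₂ : List (List Nat)) :
    Mx f (l₁ ++ l₂) = max (Mx f l₁) (Mx f l₂) := by
  unfold Mx
  rw [List.foldl_append]
  exact foldl_max_from f hf l₂ _ (Mx_nonneg f l₁)

theorem Mx_map (f : List Nat → Int) (g : List Nat → List Nat) (l : List (List Nat)) :
    Mx f (l.map g) = Mx (fun s => f (g s)) l := by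
  unfold Mx
  rw [List.foldl_map]

theorem combosN_nil_of_lt : ∀ (l : List Nat) (r : Nat), l.length < r → combosN r l = [] := by
  intro l
  induction l with
  | nil => intro r hr; match r, hr with | r + 1, _ => rfl
  | cons x xs ih =>
    intro r hr
    match r, hr with
    | r + 1, hr =>
      simp only [combosN]
      rw [ih r (by simpa using hr), ih (r + 1) (by simp at hr ⊢; omega)]
      simp

theorem availL_cons (learned : Nat) (j : Nat) (h : j ≤ 25) :
    availL learned j =
      if learned.testBit j then availL learned (j + 1)
      else j :: availL learned (j + 1) := by
  unfold availL
  have h26 : 26 - j = (26 - (j + 1)) + 1 := by omega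
  rw [h26, List.range'_succ, List.filter_cons]
  cases hb : learned.testBit j <;> simp

theorem availL_length_le (learned : Nat) (j : Nat) : (availL learned j).length ≤ 26 - j := by
  unfold availL
  exact le_trans (List.length_filter_le _ _) (by simp)

theorem availL_or_high (learned : Nat) (j : Nat) :
    availL (learned ||| (1 <<< j)) (j + 1) = availL learned (j + 1) := by
  unfold availL
  apply List.filter_congr
  intro i hi
  have hij : j + 1 ≤ i := (List.mem_range'_1.mp hi).1
  have : (learned ||| (1 <<< j)).testBit i = learned.testBit i := by
    rw [Nat.testBit_or, Nat.one_shiftLeft, Nat.testBit_two_pow]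
    simp [show ¬ j = i by omega]
  rw [this]

theorem bestOf_nonneg (words : List Nat) (learned : Nat) (r j : Nat) :
    0 ≤ bestOf words learned r j := Mx_nonneg _ _

theorem bestOf_le (words : List Nat) (learned : Nat) (r j : Nat) (N : Int)
    (hN : 0 ≤ N) (hlen : (words.length : Int) ≤ N) : bestOf words learned r j ≤ N :=
  Mx_le _ _ _ hN (fun _ _ => le_trans (cntA_le_length words _) hlen)

theorem bestOf_zero (words : List Nat) (learned : Nat) (j : Nat) :
    bestOf words learned 0 j = cntA words learned := by
  unfold bestOf Mx combosN
  simp [maskOf, max_eq_right (cntA_nonneg words learned)]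

theorem bestOf_empty (words : List Nat) (learned : Nat) (r j : Nat)
    (h : (availL learned j).length < r) : bestOf words learned r j = 0 := by
  unfold bestOf
  rw [combosN_nil_of_lt _ _ h]
  rfl

theorem bestOf_skip (words : List Nat) (learned : Nat) (r j : Nat) (hj : j ≤ 25)
    (hb : learned.testBit j = true) :
    bestOf words learned r j = bestOf words learned r (j + 1) := by
  unfold bestOf
  rw [availL_cons learned j hj, hb]
  simp

theorem bestOf_split (words : List Nat) (learned : Nat) (r j : Nat) (hj : j ≤ 25)
    (hb : learned.testBit j = false) :
    bestOf words learned (r + 1) j =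
      max (bestOf words (learned ||| (1 <<< j)) r (j + 1))
          (bestOf words learned (r + 1) (j + 1)) := by
  unfold bestOf
  rw [availL_cons learned j hj, hb]
  simp only [Bool.false_eq_true, if_false, combosN]
  rw [Mx_append _ (fun s => cntA_nonneg words _), Mx_map]
  have h1 : (fun s => cntA words (maskOf learned (j :: s)))
      = (fun s => cntA words (maskOf (learned ||| (1 <<< j)) s)) := by
    funext s; rfl
  rw [show Mx (fun s => cntA words (maskOf learned (j :: s)))
        (combosN r (availL learned (j + 1)))
      = Mx (fun s => cntA words (maskOf (learned ||| (1 <<< j)) s))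
        (combosN r (availL (learned ||| (1 <<< j)) (j + 1))) by
    rw [h1, availL_or_high]]

theorem bt_eq (N K : Int) (words : List Nat) (hN : (words.length : Int) ≤ N) :
    ∀ fuel : Nat, ∀ (k : Int) (learned : Nat) (j : Nat),
      k ≤ K → 26 - j ≤ fuel →
      backtracking (fuel + 1) N K words k learned j = bestOf words learned (K - k).toNat j := by
  intro fuel
  induction fuel using Nat.strong_induction_on with
  | _ fuel IH =>
    intro k learned j hk hfuel
    rw [backtracking]
    by_cases hkK : k = K
    · subst hkK
      simp only [BEq.rfl, if_true]
      rw [show (k - k).toNat = 0 by omega, bestOf_zero]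
      rfl
    · have hkK' : k < K := lt_of_le_of_ne hk hkK
      obtain ⟨r', hr'⟩ : ∃ r', (K - k).toNat = r' + 1 := ⟨(K - k).toNat - 1, by omega⟩
      rw [if_neg (show ¬((k == K) = true) by simpa using hkK)]
      by_cases hprune : (25 - (j : Int) + 1) < K - k
      · rw [if_pos hprune,
          bestOf_empty words learned _ j (by have h1 := availL_length_le learned j; omega)]
      · rw [if_neg hprune]
        have hj25 : j ≤ 25 := by omega
        -- loop invariant
        have hloop : ∀ n : Nat, ∀ (j' : Nat) (mx : Int), j' + n = 26 → n ≤ fuel → 0 ≤ mx →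
            btLoop fuel N K words k learned (List.range' j' n) mx
              = max mx (bestOf words learned (K - k).toNat j') := by
          intro n
          induction n with
          | zero =>
            intro j' mx hj' _ hmx
            rw [List.range'_zero, btLoop]
            rw [bestOf_empty words learned _ j' (by have := availL_length_le learned j'; omega)]
            omega
          | succ n ihn =>
            intro j' mx hj' hn hmx
            have hj'25 : j' ≤ 25 := by omega
            rw [List.range'_succ, btLoop]
            by_cases hb : learned.testBit j'
            · rw [if_pos (by rw [and_shift_eq_testBit]; exact hb)]
              rw [ihn (j' + 1) mx (by omega) (by omega) hmx,
                  bestOf_skip words learned _ j' hj'25 hb]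
            · rw [if_neg (by rw [and_shift_eq_testBit]; simp [hb])]
              obtain ⟨f', hf'⟩ : ∃ f', fuel = f' + 1 := ⟨fuel - 1, by omega⟩
              have hinner : backtracking fuel N K words (k + 1) (learned ||| (1 <<< j')) (j' + 1)
                  = bestOf words (learned ||| (1 <<< j')) r' (j' + 1) := by
                rw [hf']
                rw [IH f' (by omega) (k + 1) (learned ||| (1 <<< j')) (j' + 1) (by omega) (by omega)]
                rw [show (K - (k + 1)).toNat = r' by omega]
              simp only [hinner]
              set inner := bestOf words (learned ||| (1 <<< j')) r' (j' + 1) with hinnerdef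
              set tail := bestOf words learned (K - k).toNat (j' + 1) with htaildef
              have hsplit : bestOf words learned (K - k).toNat j' = max inner tail := by
                rw [hr']
                rw [bestOf_split words learned r' j' hj'25 (by simpa using hb)]
                rw [htaildef, hr']
              by_cases hmxN : max inner mx = N
              · rw [if_pos (by simpa using hmxN)]
                have h0N : 0 ≤ N := le_trans (le_trans hmx (le_max_right inner mx)) (le_of_eq hmxN)
                have hinnerle : inner ≤ N := le_trans (le_max_left inner mx) (le_of_eq hmxN)
                have hmxle : mx ≤ N := le_trans (le_max_right inner mx) (le_of_eq hmxN)
                have htaille : tail ≤ N := bestOf_le words learned _ _ N h0N hN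
                rw [hsplit, hmxN]
                have h1 : max mx (max inner tail) ≤ N := max_le hmxle (max_le hinnerle htaille)
                have h2 : N ≤ max mx (max inner tail) := by
                  rw [← hmxN]
                  exact max_le (le_trans (le_max_left inner tail) (le_max_right mx _))
                    (le_max_left mx _)
                omega
              · rw [if_neg (by simpa using hmxN)]
                rw [ihn (j' + 1) (max inner mx) (by omega) (by omega)
                  (le_trans hmx (le_max_right inner mx))]
                rw [hsplit, max_left_comm, max_assoc]
        rw [hloop (26 - j) j 0 (by omega) hfuel le_rfl]
        exact max_eq_right (bestOf_nonneg words learned _ j)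

theorem foldl_push_map {α β : Type} (f : α → β) (l : List α) :
    ∀ acc : List β, l.foldl (fun acc w => acc ++ [f w]) acc = acc ++ l.map f := by
  induction l with
  | nil => intro acc; simp
  | cons x xs ih => intro acc; simp [ih]

-- ===== VERDICT (by name: the statement is the Claim_ definition above) =====
theorem solution_spec : Claim_equal_solution := by
  intro N K words _ hpre
  unfold Spec_solution solution solution_alt
  by_cases h5 : K < 5
  · simp [h5]
  · rw [if_neg h5, if_neg h5]
    by_cases h26 : K = 26
    · simp [h26]
    · rw [if_neg (by simpa using h26), if_neg (by simpa using h26)]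
      obtain ⟨hchars, hlen⟩ : (∀ w ∈ words, ∀ c ∈ w.toList, 97 ≤ c.toNat) ∧
          (words.length : Int) ≤ N := by
        rcases hpre with h | h | h
        · omega
        · exact absurd h h26
        · exact h
      clear hchars
      -- word bitmask lists agree
      rw [foldl_push_map (fun word => word.toList.foldl (fun bit c => bit ||| (1 <<< (c.toNat - 97))) 0) words []]
      have hbits : words.map (fun word => word.toList.foldl (fun bit c => bit ||| (1 <<< (c.toNat - 97))) 0)
          = words.map wordMask := rfl
      rw [List.nil_append, hbits]
      -- both learned masks are the literal 532741
      rw [show (['a', 'n', 't', 'i', 'c'].foldl (fun l c => l ||| (1 <<< (c.toNat - 97))) 0) = 532741 by decide]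
      rw [show ("antic".toList.foldl (fun m c => m ||| (1 <<< (c.toNat - 97))) 0) = 532741 by decide]
      -- A's backtracking equals bestOf
      have hlen' : ((words.map wordMask).length : Int) ≤ N := by simpa using hlen
      rw [show (40 : Nat) = 39 + 1 from rfl,
        bt_eq N K (words.map wordMask) hlen' 39 5 532741 1 (by omega) (by omega)]
      -- B's fold equals bestOf
      simp only []
      rw [show ((List.range 26).filter (fun i => ((532741 : Nat) >>> i) &&& 1 == 0))
          = availL 532741 1 by decide]
      unfold bestOf Mx
      rw [show (K - 5).toNat = (K - 5).toNat from rfl]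
      apply List.foldl_ext
      intro b s _
      simp only []
      rw [cntA_eq_filter_length]
      rfl
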